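-- pv_equiv track=rewrite | github.com/LyoRex/LeoBot | cogs/threeletters.py | letters_in_word
-- ===== SOURCE A (Python) =====
-- def letters_in_word(word, letters):
--     letter_list = list(letters)
--     found_letters = False
--     len_word = len(word)
--     for i in range(len_word):
--         if word[i] == letter_list[0]:
--             for j in range(i+1, len_word):
--                 if word[j] == letter_list[1]:
--                     for k in range(j+1, len_word):
--                         if word[k] == letter_list[2]:
--                             found_letters = True
--     return found_letters
-- ===== SOURCE B (Python) =====
-- def letters_in_word(word, letters):
--     need = (letters[0], letters[1], letters[2])
--     pos = 0
--     for ch in word: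
--         if pos < 3 and ch == need[pos]:
--             pos += 1
--     return pos == 3
-- ===== Notes on version B (the rewrite author's own statement) =====
-- stated objective: faster
-- what changed: Replaced the triple nested index scan with a single left-to-right greedy pass that advances a pointer over the three target letters.
-- outside the precondition, e.g. on letters_in_word('xyz', 'ab'): A returns False, B raises IndexError
import Mathlib
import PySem

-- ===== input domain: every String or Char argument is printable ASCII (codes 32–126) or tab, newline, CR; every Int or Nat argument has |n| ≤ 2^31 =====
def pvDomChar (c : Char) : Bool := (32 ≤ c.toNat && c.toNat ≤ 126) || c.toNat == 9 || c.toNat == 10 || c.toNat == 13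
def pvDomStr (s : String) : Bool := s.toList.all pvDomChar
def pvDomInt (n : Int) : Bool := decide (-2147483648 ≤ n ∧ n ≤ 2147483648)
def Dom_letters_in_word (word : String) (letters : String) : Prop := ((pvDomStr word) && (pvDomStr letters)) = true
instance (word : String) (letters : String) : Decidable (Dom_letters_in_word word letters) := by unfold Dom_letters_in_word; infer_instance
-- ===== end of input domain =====

-- B replaces A's triple nested index scan by a single greedy left-to-right pass (asymptotically faster).

-- ===== PORT A =====
-- Triple nested loop over indices; every index produced by the ranges is in bounds,
-- and under Pre_ letters has at least 3 characters, so getD is exact for word[i]/letter_list[0..2].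
def letters_in_word (word : String) (letters : String) : Bool :=
  let ll := letters.toList
  let lw := word.toList
  let n := lw.length
  (List.range n).foldl (fun found i =>
    if lw.getD i ' ' = ll.getD 0 ' ' then
      (List.range' (i+1) (n - (i+1))).foldl (fun f j =>
        if lw.getD j ' ' = ll.getD 1 ' ' then
          (List.range' (j+1) (n - (j+1))).foldl (fun g k =>
            if lw.getD k ' ' = ll.getD 2 ' ' then true else g) f
        else f) found
    else found) false

-- ===== PORT B =====
-- Single pass: pos counts how many of the first three letters have been matched so far.
def letters_in_word_alt (word : String) (letters : String) : Bool :=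
  let ll := letters.toList
  (word.toList.foldl (fun pos ch =>
    if pos < 3 ∧ ch = ll.getD pos ' ' then pos + 1 else pos) 0) == 3

-- ===== PRECONDITION & SPEC =====
-- Pre_ excludes letters with fewer than 3 characters: there Python A raises IndexError
-- whenever the word continues past a partial match, and only returns False when the
-- search fails early (B unpacks the three letters up front and raises on all of them).
def Pre_letters_in_word (_word : String) (letters : String) : Prop :=
  3 ≤ letters.toList.length
instance (word : String) (letters : String) : Decidable (Pre_letters_in_word word letters) := by
  unfold Pre_letters_in_word; infer_instance

def pvWitness_letters_in_word : String × String := ("xaxbxc", "abc")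

def Spec_letters_in_word (word : String) (letters : String) (out : Bool) : Prop := out = letters_in_word_alt word letters
instance (word : String) (letters : String) (out : Bool) : Decidable (Spec_letters_in_word word letters out) := by unfold Spec_letters_in_word; infer_instance

-- ===== CLAIM (what is proved, stated in full; the proofs are below) =====
def Claim_equal_letters_in_word : Prop := ∀ (word : String) (letters : String), Dom_letters_in_word word letters → Pre_letters_in_word word letters → Spec_letters_in_word word letters (letters_in_word word letters)

-- ===== LEMMAS AND PROOFS =====

-- "some proper tail split x :: xs of l satisfies R x xs"
def tailsAny (R : Char → List Char → Bool) : List Char → Bool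
  | [] => false
  | x :: xs => R x xs || tailsAny R xs

def S2 (c : Char) (l : List Char) : Bool := tailsAny (fun x _ => decide (x = c)) l
def S1 (b c : Char) (l : List Char) : Bool := tailsAny (fun x r => decide (x = b) && S2 c r) l
def S0 (a b c : Char) (l : List Char) : Bool := tailsAny (fun x r => decide (x = a) && S1 b c r) l

-- a loop that only ever sets the flag computes an `any`
theorem foldl_set_true {β : Type} (l : List β) (p : β → Prop) [DecidablePred p] :
    ∀ f0 : Bool, l.foldl (fun f x => if p x then true else f) f0 = (f0 || l.any fun x => decide (p x)) := by
  induction l with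
  | nil => intro f0; simp
  | cons x xs ih =>
    intro f0
    simp only [List.foldl_cons, List.any_cons, ih]
    by_cases h : p x <;> simp [h]

theorem foldl_or_any {β : Type} (l : List β) (p : β → Prop) [DecidablePred p] (r : β → Bool) :
    ∀ f0 : Bool, l.foldl (fun f x => if p x then (f || r x) else f) f0 = (f0 || l.any fun x => decide (p x) && r x) := by
  induction l with
  | nil => intro f0; simp
  | cons x xs ih =>
    intro f0
    simp only [List.foldl_cons, List.any_cons, ih]
    by_cases h : p x <;> cases hr : r x <;> simp [h]

theorem rangeTails (lw : List Char) (R : Char → List Char → Bool) :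
    ∀ (m s : Nat), lw.length - s = m →
      (List.range' s m).any (fun j => R (lw.getD j ' ') (lw.drop (j+1))) = tailsAny R (lw.drop s) := by
  intro m
  induction m with
  | zero =>
    intro s h
    have hle : lw.length ≤ s := by omega
    simp [List.drop_eq_nil_of_le hle, tailsAny]
  | succ k ih =>
    intro s h
    have hs : s < lw.length := by omega
    have hgd : lw.getD s ' ' = lw[s] := by
      simp [List.getD_eq_getElem?_getD, List.getElem?_eq_getElem hs]
    rw [List.range'_succ, List.any_cons, ih (s+1) (by omega),
        List.drop_eq_getElem_cons hs]
    simp [tailsAny, List.getElem?_eq_getElem hs]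

theorem rangeTails' (lw : List Char) (R : Char → List Char → Bool) (s : Nat) :
    (List.range' s (lw.length - s)).any (fun j => R (lw.getD j ' ') (lw.drop (j+1))) = tailsAny R (lw.drop s) :=
  rangeTails lw R _ s rfl

-- A's nested loops compute S0
theorem A_eq_S0 (lw : List Char) (a b c : Char) :
    ((List.range lw.length).foldl (fun found i =>
      if lw.getD i ' ' = a then
        (List.range' (i+1) (lw.length - (i+1))).foldl (fun f j =>
          if lw.getD j ' ' = b then
            (List.range' (j+1) (lw.length - (j+1))).foldl (fun g k =>
              if lw.getD k ' ' = c then true else g) f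
          else f) found
      else found) false) = S0 a b c lw := by
  simp only [foldl_set_true, foldl_or_any, Bool.false_or]
  have h3 := fun s => rangeTails' lw (fun x _ => decide (x = c)) s
  simp only [h3]
  have h2 := fun s => rangeTails' lw (fun x r => decide (x = b) && tailsAny (fun x _ => decide (x = c)) r) s
  simp only [h2]
  have h1 := rangeTails' lw (fun x r => decide (x = a) && tailsAny (fun x r' => decide (x = b) && tailsAny (fun x _ => decide (x = c)) r') r) 0
  simp only [Nat.sub_zero, List.drop_zero] at h1
  rw [List.range_eq_range', h1]
  simp [S0, S1, S2]

theorem S2_cons (c x : Char) (xs : List Char) : S2 c (x :: xs) = (decide (x = c) || S2 c xs) := rfl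
theorem S1_cons (b c x : Char) (xs : List Char) : S1 b c (x :: xs) = ((decide (x = b) && S2 c xs) || S1 b c xs) := rfl
theorem S0_cons (a b c x : Char) (xs : List Char) : S0 a b c (x :: xs) = ((decide (x = a) && S1 b c xs) || S0 a b c xs) := rfl

theorem mono12 (b c : Char) : ∀ l : List Char, S1 b c l = true → S2 c l = true := by
  intro l
  induction l with
  | nil => simp [S1, S2, tailsAny]
  | cons x xs ih =>
    simp only [S1_cons, S2_cons, Bool.or_eq_true, Bool.and_eq_true] at *
    rintro (⟨_, h2⟩ | h1)
    · exact Or.inr h2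
    · exact Or.inr (ih h1)

theorem mono01 (a b c : Char) : ∀ l : List Char, S0 a b c l = true → S1 b c l = true := by
  intro l
  induction l with
  | nil => simp [S0, S1, tailsAny]
  | cons x xs ih =>
    simp only [S0_cons, S1_cons, Bool.or_eq_true, Bool.and_eq_true] at *
    rintro (⟨_, h1⟩ | h0)
    · exact Or.inr h1
    · exact Or.inr (ih h0)

-- B's single pass computes S0 (greedy completeness)
theorem B_fold (a b c : Char) (need : Nat → Char)
    (h0 : need 0 = a) (h1 : need 1 = b) (h2 : need 2 = c) :
    ∀ (lw : List Char) (pos : Nat),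
      ((lw.foldl (fun pos ch => if pos < 3 ∧ ch = need pos then pos + 1 else pos) pos) == 3) =
        (if pos = 0 then S0 a b c lw else if pos = 1 then S1 b c lw
         else if pos = 2 then S2 c lw else if pos = 3 then true else false) := by
  intro lw
  induction lw with
  | nil =>
    intro pos
    rcases pos with _|_|_|_|n <;> simp [S0, S1, S2, tailsAny]
  | cons x xs ih =>
    intro pos
    simp only [List.foldl_cons]
    rcases pos with _|_|_|_|n
    · by_cases hx : x = a
      · have : (0 < 3 ∧ x = need 0) := ⟨by omega, by rw [h0]; exact hx⟩
        rw [if_pos this, ih 1]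
        rw [S0_cons]
        simp only [hx, decide_true, Bool.true_and]
        cases hS : S0 a b c xs
        · simp
        · simp [mono01 a b c xs hS]
      · have : ¬ (0 < 3 ∧ x = need 0) := by rw [h0]; tauto
        rw [if_neg this, ih 0]
        simp [S0_cons, hx]
    · by_cases hx : x = b
      · have : (1 < 3 ∧ x = need 1) := ⟨by omega, by rw [h1]; exact hx⟩
        rw [if_pos this, ih 2]
        rw [S1_cons]
        simp only [hx, decide_true, Bool.true_and]
        cases hS : S1 b c xs
        · simp
        · simp [mono12 b c xs hS]
      · have : ¬ (1 < 3 ∧ x = need 1) := by rw [h1]; tauto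
        rw [if_neg this, ih 1]
        simp [S1_cons, hx]
    · by_cases hx : x = c
      · have : (2 < 3 ∧ x = need 2) := ⟨by omega, by rw [h2]; exact hx⟩
        rw [if_pos this, ih 3]
        simp [S2_cons, hx]
      · have : ¬ (2 < 3 ∧ x = need 2) := by rw [h2]; tauto
        rw [if_neg this, ih 2]
        simp [S2_cons, hx]
    · have : ¬ ((3:Nat) < 3 ∧ x = need 3) := by omega
      rw [if_neg this, ih 3]
      simp
    · have : ¬ (n + 4 < 3 ∧ x = need (n+4)) := by omega
      rw [if_neg this, ih (n+4)]
      simp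

-- ===== VERDICT (by name: the statement is the Claim_ definition above) =====
theorem letters_in_word_spec : Claim_equal_letters_in_word := by
  intro word letters _dom _pre
  unfold Spec_letters_in_word letters_in_word letters_in_word_alt
  simp only []
  rw [A_eq_S0 word.toList (letters.toList.getD 0 ' ') (letters.toList.getD 1 ' ') (letters.toList.getD 2 ' '),
      B_fold (letters.toList.getD 0 ' ') (letters.toList.getD 1 ' ') (letters.toList.getD 2 ' ')
        (fun p => letters.toList.getD p ' ') rfl rfl rfl word.toList 0]
  simp
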